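-- pv_equiv track=rewrite | github.com/casconalio/Heureka | Inference_Engine/Inference_Engine.py | comb_to_explore
-- ===== SOURCE A (Python) =====
-- def comb_to_explore(new_clauses):#returns all possible unique combinations of to explore
-- #so when breakfast if hotdrink and food is explored. Every combination of clauses with hot dirnk and food
-- #as the result are returned
--     to_explore = []
--     for clause in new_clauses:
--         if to_explore:
--             new_l = []
--             for i in clause:
--                 for j in to_explore:
--                     new_l.append([i])
--                     new_l[-1].extend(j)
--             to_explore = new_l
--         else:
--             for i in clause:
--                 to_explore.append([i])
--     return to_explore
-- ===== SOURCE B (Python) =====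
-- def comb_to_explore(new_clauses):
--     # Direct recursion on all-but-the-last clause; the last clause varies slowest,
--     # and each element is prepended, matching A's ordering exactly.
--     if not new_clauses:
--         return []
--     prev = comb_to_explore(new_clauses[:-1])
--     last = new_clauses[-1]
--     if prev:
--         return [[x] + j for x in last for j in prev]
--     return [[x] for x in last]
-- ===== Notes on version B (the rewrite author's own statement) =====
-- stated objective: simpler
-- what changed: Replaces A's iterative accumulator with inner append loops by a direct structural recursion on all-but-the-last clause, building each row with one comprehension.
import Mathlib
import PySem

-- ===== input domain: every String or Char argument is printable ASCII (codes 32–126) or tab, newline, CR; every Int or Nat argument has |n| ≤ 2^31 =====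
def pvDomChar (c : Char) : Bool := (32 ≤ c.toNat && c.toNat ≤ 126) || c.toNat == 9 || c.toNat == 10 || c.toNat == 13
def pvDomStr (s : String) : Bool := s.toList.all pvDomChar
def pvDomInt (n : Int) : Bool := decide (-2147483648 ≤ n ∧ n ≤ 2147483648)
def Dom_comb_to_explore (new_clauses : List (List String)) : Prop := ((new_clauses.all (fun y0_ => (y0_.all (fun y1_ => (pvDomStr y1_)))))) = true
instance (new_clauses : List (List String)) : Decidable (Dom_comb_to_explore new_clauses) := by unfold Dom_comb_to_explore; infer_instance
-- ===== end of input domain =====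

-- B replaces A's iterative accumulator (with hand-rolled append loops) by a direct
-- structural recursion on all-but-the-last clause; same result, simpler decomposition.

-- ===== PORT A =====
-- one step of A's outer loop: the body for one `clause` acting on `to_explore`
def combStepA (to_explore : List (List String)) (clause : List String) : List (List String) :=
  if to_explore ≠ [] then
    -- new_l = []; for i in clause: for j in to_explore: new_l.append([i]); new_l[-1].extend(j)
    clause.foldl (fun new_l i =>
      to_explore.foldl (fun new_l j => new_l ++ [i :: j]) new_l) []
  else
    -- for i in clause: to_explore.append([i])
    clause.foldl (fun te i => te ++ [[i]]) to_explore

def comb_to_explore (new_clauses : List (List String)) : List (List String) :=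
  new_clauses.foldl combStepA []

-- ===== PORT B =====
-- recursion peeling the LAST clause (new_clauses[:-1] / new_clauses[-1]);
-- implemented as structural recursion on the reversed list
def combAltRev : List (List String) → List (List String)
  | [] => []
  | last :: rest =>
    let prev := combAltRev rest
    if prev ≠ [] then
      last.flatMap (fun x => prev.map (fun j => x :: j))
    else
      last.map (fun x => [x])

def comb_to_explore_alt (new_clauses : List (List String)) : List (List String) :=
  combAltRev new_clauses.reverse

-- ===== PRECONDITION & SPEC =====
def Spec_comb_to_explore (new_clauses : List (List String)) (out : List (List String)) : Prop := out = comb_to_explore_alt new_clauses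
instance (new_clauses : List (List String)) (out : List (List String)) : Decidable (Spec_comb_to_explore new_clauses out) := by unfold Spec_comb_to_explore; infer_instance

-- ===== CLAIM (what is proved, stated in full; the proofs are below) =====
def Claim_equal_comb_to_explore : Prop := ∀ (new_clauses : List (List String)), Dom_comb_to_explore new_clauses → Spec_comb_to_explore new_clauses (comb_to_explore new_clauses)

-- ===== LEMMAS AND PROOFS =====

theorem foldl_app_cons (i : String) (acc : List (List String)) (s : List (List String)) :
    acc.foldl (fun new_l j => new_l ++ [i :: j]) s = s ++ acc.map (fun j => i :: j) := by
  induction acc generalizing s with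
  | nil => simp
  | cons a t ih => simp [List.foldl, ih]

theorem foldl_outer (clause : List String) (acc : List (List String)) (s : List (List String)) :
    clause.foldl (fun new_l i => acc.foldl (fun new_l j => new_l ++ [i :: j]) new_l) s
      = s ++ clause.flatMap (fun i => acc.map (fun j => i :: j)) := by
  induction clause generalizing s with
  | nil => simp
  | cons c t ih =>
    rw [List.foldl_cons, foldl_app_cons, ih, List.flatMap_cons, List.append_assoc]

theorem foldl_singletons (clause : List String) (s : List (List String)) :
    clause.foldl (fun te i => te ++ [[i]]) s = s ++ clause.map (fun x => [x]) := by
  induction clause generalizing s with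
  | nil => simp
  | cons c t ih => simp [List.foldl, ih]

theorem combStepA_eq (acc : List (List String)) (clause : List String) :
    combStepA acc clause
      = if acc ≠ [] then clause.flatMap (fun i => acc.map (fun j => i :: j))
        else clause.map (fun x => [x]) := by
  unfold combStepA
  split_ifs with h
  · simpa using foldl_outer clause acc []
  · simp at h
    simpa [h] using foldl_singletons clause []

theorem foldl_rev_eq (r : List (List String)) :
    List.foldl combStepA [] r.reverse = combAltRev r := by
  induction r with
  | nil => rfl
  | cons last rest ih =>
    simp only [List.reverse_cons, List.foldl_append, List.foldl_cons, List.foldl_nil, ih]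
    rw [combAltRev, combStepA_eq]

-- ===== VERDICT (by name: the statement is the Claim_ definition above) =====
theorem comb_to_explore_spec : Claim_equal_comb_to_explore := by
  intro ncs _
  unfold Spec_comb_to_explore comb_to_explore comb_to_explore_alt
  have := foldl_rev_eq ncs.reverse
  simpa using this
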